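-- pv_equiv track=rewrite | github.com/rhit-deckerza/ResumeBuilderMCP | resume_compiler.py | parse_bullet_text_html
-- ===== SOURCE A (Python) =====
-- def parse_bullet_text_html(text):
--     """Parse text with bold formatting (text inside ** will be bolded)"""
--     if not isinstance(text, str):
--         return str(text)
--
--     if '**' not in text:
--         return text
--
--     # Replace **text** with <strong>text</strong>
--     parts = []
--     is_bold = False
--     current_part = ""
--     i = 0
--
--     while i < len(text):
--         if i + 1 < len(text) and text[i:i+2] == '**':
--             # Add the current part to the result
--             if current_part:
--                 parts.append(f"<strong>{current_part}</strong>" if is_bold else current_part)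
--                 current_part = ""
--
--             # Toggle bold state
--             is_bold = not is_bold
--             i += 2
--         else:
--             current_part += text[i]
--             i += 1
--
--     # Add the last part
--     if current_part:
--         parts.append(f"<strong>{current_part}</strong>" if is_bold else current_part)
--
--     return "".join(parts)
-- ===== SOURCE B (Python) =====
-- def parse_bullet_text_html(text):
--     """Parse text with bold formatting (text inside ** will be bolded)"""
--     if not isinstance(text, str):
--         return str(text)
--     pieces = []
--     for i, seg in enumerate(text.split('**')):
--         if seg:
--             pieces.append(seg if i % 2 == 0 else f"<strong>{seg}</strong>")
--     return "".join(pieces)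
-- ===== Notes on version B (the rewrite author's own statement) =====
-- stated objective: simpler
-- what changed: A's character-by-character while loop with toggle/flush state (is_bold, current_part) is replaced by splitting the text on the double-asterisk marker and one pass over the enumerated segments, rendering odd-index segments as strong tags and skipping empty segments.
import Mathlib
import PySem

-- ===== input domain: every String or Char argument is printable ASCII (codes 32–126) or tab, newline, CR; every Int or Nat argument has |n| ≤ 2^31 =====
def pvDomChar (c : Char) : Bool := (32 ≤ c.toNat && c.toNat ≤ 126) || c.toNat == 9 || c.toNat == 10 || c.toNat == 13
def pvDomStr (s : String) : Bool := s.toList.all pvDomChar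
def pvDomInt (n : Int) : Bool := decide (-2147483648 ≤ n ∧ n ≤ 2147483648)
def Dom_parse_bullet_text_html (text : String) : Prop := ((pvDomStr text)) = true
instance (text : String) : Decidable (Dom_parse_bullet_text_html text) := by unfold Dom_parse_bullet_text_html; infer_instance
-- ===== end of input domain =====

-- B replaces A's char-by-char toggle/flush state machine by split('**') with even/odd
-- parity rendering (objective: simpler); same return value on every String input.

-- ===== PORT A =====
-- A's f"<strong>{...}</strong>" wrapping of a flushed part
def pvRenderA (is_bold : Bool) (cur : List Char) : List Char :=
  if is_bold then "<strong>".toList ++ cur ++ "</strong>".toList else cur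

-- A's "if current_part: parts.append(...)"
def pvFlushA (is_bold : Bool) (cur : List Char) : List (List Char) :=
  if cur ≠ [] then [pvRenderA is_bold cur] else []

-- A's while loop over the characters: state (parts, is_bold, current_part);
-- text[i:i+2] == '**' becomes matching the next two characters.
def pvLoopA : List Char → List (List Char) → Bool → List Char → List (List Char)
  | [], parts, b, cur => parts ++ pvFlushA b cur
  | [c], parts, b, cur => pvLoopA [] parts b (cur ++ [c])
  | c1 :: c2 :: rest, parts, b, cur =>
    if c1 = '*' ∧ c2 = '*' then pvLoopA rest (parts ++ pvFlushA b cur) (!b) []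
    else pvLoopA (c2 :: rest) parts b (cur ++ [c1])

-- "".join(parts) ported as List.flatten (exact for the empty separator)
def parse_bullet_text_html (text : String) : String :=
  if PySem.Str.isIn "**" text = true then
    String.ofList (pvLoopA text.toList [] false []).flatten
  else text

-- ===== PORT B =====
-- hand port of text.split('**'): exact Python semantics for this non-empty
-- separator — leftmost non-overlapping matches, empty pieces kept.
def pvSplit2 : List Char → List (List Char)
  | [] => [[]]
  | [c] => [[c]]
  | c1 :: c2 :: rest =>
    if c1 = '*' ∧ c2 = '*' then [] :: pvSplit2 rest
    else
      match pvSplit2 (c2 :: rest) with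
      | s :: ss => (c1 :: s) :: ss
      | [] => [[c1]]

-- B's "for i, seg in enumerate(parts)" loop collecting pieces
def pvGoB : Nat → List (List Char) → List (List Char)
  | _, [] => []
  | i, seg :: rest =>
    (if seg ≠ [] then
      [if i % 2 = 0 then seg else "<strong>".toList ++ seg ++ "</strong>".toList]
     else []) ++ pvGoB (i + 1) rest

def parse_bullet_text_html_alt (text : String) : String :=
  String.ofList (pvGoB 0 (pvSplit2 text.toList)).flatten

-- ===== PRECONDITION & SPEC =====
def Spec_parse_bullet_text_html (text : String) (out : String) : Prop := out = parse_bullet_text_html_alt text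
instance (text : String) (out : String) : Decidable (Spec_parse_bullet_text_html text out) := by unfold Spec_parse_bullet_text_html; infer_instance

-- ===== CLAIM (what is proved, stated in full; the proofs are below) =====
def Claim_equal_parse_bullet_text_html : Prop := ∀ (text : String), Dom_parse_bullet_text_html text → Spec_parse_bullet_text_html text (parse_bullet_text_html text)

-- ===== LEMMAS AND PROOFS =====

-- common specification: render the split pieces, alternating plain/bold, skipping empties
def pvRSegs (b : Bool) : List (List Char) → List Char
  | [] => []
  | s :: ss => (if s ≠ [] then pvRenderA b s else []) ++ pvRSegs (!b) ss

def pvConsHead (cur : List Char) : List (List Char) → List (List Char)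
  | [] => [cur]
  | s :: ss => (cur ++ s) :: ss

theorem pvSplit2_ne_nil (cs : List Char) : pvSplit2 cs ≠ [] := by
  fun_induction pvSplit2 cs <;> simp_all

theorem pvSplit2_cons2 (c1 c2 : Char) (rest : List Char) (h : ¬ (c1 = '*' ∧ c2 = '*'))
    (s : List Char) (ss : List (List Char)) (hss : pvSplit2 (c2 :: rest) = s :: ss) :
    pvSplit2 (c1 :: c2 :: rest) = (c1 :: s) :: ss := by
  simp [pvSplit2, h, hss]

theorem pvSplit2_shape (cs : List Char) : ∃ s ss, pvSplit2 cs = s :: ss := by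
  rcases h : pvSplit2 cs with _ | ⟨s, ss⟩
  · exact absurd h (pvSplit2_ne_nil cs)
  · exact ⟨s, ss, rfl⟩

theorem pvGoB_flatten (ss : List (List Char)) : ∀ i : Nat,
    (pvGoB i ss).flatten = pvRSegs (decide (i % 2 = 1)) ss := by
  induction ss with
  | nil => intro i; simp [pvGoB, pvRSegs]
  | cons s ss ih =>
    intro i
    have h2 : (decide ((i + 1) % 2 = 1)) = ! decide (i % 2 = 1) := by
      rcases Nat.mod_two_eq_zero_or_one i with h | h <;> simp [Nat.add_mod, h]
    rcases Nat.mod_two_eq_zero_or_one i with h | h <;>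
      simp [pvGoB, pvRSegs, ih, pvRenderA, h2, h] <;> split <;> simp

theorem pvLoopA_flatten (cs : List Char) (parts : List (List Char)) (b : Bool)
    (cur : List Char) :
    (pvLoopA cs parts b cur).flatten
      = parts.flatten ++ pvRSegs b (pvConsHead cur (pvSplit2 cs)) := by
  fun_induction pvLoopA cs parts b cur with
  | case1 parts b cur =>
    simp [pvSplit2, pvConsHead, pvRSegs, pvFlushA]
    split <;> simp
  | case2 c parts b cur ih =>
    rw [ih]
    simp [pvSplit2, pvConsHead, pvRSegs]
  | case3 c1 c2 rest parts b cur hstar ih =>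
    rw [ih]
    obtain ⟨s, ss, hss⟩ := pvSplit2_shape rest
    simp [pvSplit2, hstar, hss, pvConsHead, pvRSegs, pvFlushA]
    split <;> simp
  | case4 c1 c2 rest parts b cur hstar ih =>
    rw [ih]
    obtain ⟨s, ss, hss⟩ := pvSplit2_shape (c2 :: rest)
    rw [pvSplit2_cons2 c1 c2 rest hstar s ss hss, hss]
    simp [pvConsHead]

theorem pvSplit2_no_sep (cs : List Char) (h : ¬ ['*','*'] <:+: cs) :
    pvSplit2 cs = [cs] := by
  fun_induction pvSplit2 cs with
  | case1 => rfl
  | case2 => rfl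
  | case3 c1 c2 rest hstar =>
    exact absurd ⟨[], rest, by simp [hstar.1, hstar.2]⟩ h
  | case4 c1 c2 rest hstar s ss heq ih =>
    have hsub : ¬ ['*','*'] <:+: (c2 :: rest) := fun hin =>
      h (hin.trans (List.suffix_cons c1 (c2 :: rest)).isInfix)
    rw [ih hsub] at heq
    simp_all
  | case5 c1 c2 rest hstar heq =>
    exact absurd heq (pvSplit2_ne_nil _)

-- ===== VERDICT (by name: the statement is the Claim_ definition above) =====
theorem parse_bullet_text_html_spec : Claim_equal_parse_bullet_text_html := by
  intro text _
  show parse_bullet_text_html text = parse_bullet_text_html_alt text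
  unfold parse_bullet_text_html parse_bullet_text_html_alt
  by_cases hin : PySem.Str.isIn "**" text = true
  · rw [if_pos hin, pvGoB_flatten, pvLoopA_flatten]
    obtain ⟨s, ss, hss⟩ := pvSplit2_shape text.toList
    simp [hss, pvConsHead]
  · rw [if_neg hin]
    have hnf : ¬ ['*','*'] <:+: text.toList := by
      have := (PySem.Chars.isIn_eq_false_iff "**".toList text.toList).mp
        (by simpa using eq_false_of_ne_true hin)
      simpa using this
    rw [pvGoB_flatten, pvSplit2_no_sep _ hnf]
    rcases eq_or_ne text "" with rfl | hne
    · simp [pvRSegs]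
    · have : text.toList ≠ [] := by simpa using hne
      simp [pvRSegs, pvRenderA, this, String.ofList_toList]
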